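-- pv_equiv track=rewrite | github.com/rawanvib/slurp | ingredient_parser_v2.py | cleaned_name
-- ===== SOURCE A (Python) =====
-- def replace_str_index(text, index=0, replacement=''):
--     return '%s%s%s' % (text[:index], replacement, text[index + 1:])
--
-- conjunctions = ['after', 'although', 'as', 'as long as', 'though', 'because', 'before', 'if', 'though', 'that', 'lest',
--                 'once', 'since', 'so', 'that', 'than', 'though', 'till', 'unless', 'until', 'when', 'whenever', 'where',
--                 'whereas', 'wherever', 'for', 'nor', 'but', 'or', 'yet', 'so', 'in', 'on', 'of', 'and', 'to', 'x']
--
-- def cleaned_name(name1):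
--     name = name1.strip()
--     name = name.replace("  ", " ")
--     name = name.replace("&", "and")
--     name = name.replace("-", " ")
--     if name:
--         if not name[0].isalnum():
--             name = replace_str_index(name, 0)
--             name = name.strip()
--         if name:
--             if not name[-1].isalnum():
--                 name = replace_str_index(name, len(name) - 1)
--                 name = name.strip()
--         name_split = name.split(" ")
--         if name_split:
--             if name_split[0] in conjunctions:
--                 del name_split[0]
--         if name_split:
--             if name_split[-1] in conjunctions:
--                 del name_split[-1]
--         name = " ".join(name_split)
--     if name == name1:
--         return name.strip()
--     else:
--         return cleaned_name(name)
-- ===== SOURCE B (Python) =====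
-- conjunctions = ['after', 'although', 'as', 'as long as', 'though', 'because', 'before', 'if', 'though', 'that', 'lest',
--                 'once', 'since', 'so', 'that', 'than', 'though', 'till', 'unless', 'until', 'when', 'whenever', 'where',
--                 'whereas', 'wherever', 'for', 'nor', 'but', 'or', 'yet', 'so', 'in', 'on', 'of', 'and', 'to', 'x']
--
-- def _pass(prev):
--     s = prev.strip().replace("  ", " ").replace("&", "and").replace("-", " ")
--     if not s:
--         return s
--     if not s[0].isalnum():
--         s = s[1:].strip()
--     if s and not s[-1].isalnum():
--         s = s[:-1].strip()
--     toks = s.split(" ")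
--     if toks and toks[0] in conjunctions:
--         toks = toks[1:]
--     if toks and toks[-1] in conjunctions:
--         toks = toks[:-1]
--     return " ".join(toks)
--
-- def cleaned_name(name1):
--     name = name1
--     while True:
--         s = _pass(name)
--         if s == name:
--             return s.strip()
--         name = s
-- ===== Notes on version B (the rewrite author's own statement) =====
-- stated objective: simpler
-- what changed: A's tail recursion is rewritten as an iterative fixpoint loop around a separate single-pass helper, with the char/token trimming done by slicing (s[1:], s[:-1], toks[1:], toks[:-1]) instead of the replace_str_index splice helper and del statements.
import Mathlib
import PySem

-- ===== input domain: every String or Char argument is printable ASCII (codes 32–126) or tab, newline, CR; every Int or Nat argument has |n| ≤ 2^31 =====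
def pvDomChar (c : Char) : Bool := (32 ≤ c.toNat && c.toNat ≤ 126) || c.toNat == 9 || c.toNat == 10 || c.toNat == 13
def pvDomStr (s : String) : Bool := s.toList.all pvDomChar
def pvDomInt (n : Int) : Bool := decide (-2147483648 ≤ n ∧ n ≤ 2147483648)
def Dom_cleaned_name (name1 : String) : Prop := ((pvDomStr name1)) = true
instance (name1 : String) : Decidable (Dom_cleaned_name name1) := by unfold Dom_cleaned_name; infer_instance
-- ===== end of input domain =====

-- B rewrites A's tail recursion as a while-loop around a separate single-pass helper (objective: simpler decomposition, same cost).

-- ===== PORT A =====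
-- module constant `conjunctions` (shared context of A and B)
def conjunctions : List (List Char) :=
  ["after".toList, "although".toList, "as".toList, "as long as".toList, "though".toList, "because".toList,
   "before".toList, "if".toList, "though".toList, "that".toList, "lest".toList, "once".toList, "since".toList,
   "so".toList, "that".toList, "than".toList, "though".toList, "till".toList, "unless".toList, "until".toList,
   "when".toList, "whenever".toList, "where".toList, "whereas".toList, "wherever".toList, "for".toList,
   "nor".toList, "but".toList, "or".toList, "yet".toList, "so".toList, "in".toList, "on".toList, "of".toList,
   "and".toList, "to".toList, "x".toList]

-- '%s%s%s' % (text[:index], replacement, text[index+1:])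
def replace_str_index (text : List Char) (index : Int) (replacement : List Char) : List Char :=
  PySem.List.slice text none (some index) ++ replacement ++ PySem.List.slice text (some (index + 1)) none

-- A's body, with a fuel parameter making the self-recursion total (fuel is ample on every input; see bound note at cleaned_name)
def cleanedRecA : Nat → List Char → List Char
  | 0, name1 => name1
  | n + 1, name1 =>
    let name := PySem.Chars.strip name1
    let name := PySem.Chars.replace name "  ".toList " ".toList
    let name := PySem.Chars.replace name "&".toList "and".toList
    let name := PySem.Chars.replace name "-".toList " ".toList
    let name :=
      if name ≠ [] then
        let name :=
          match PySem.List.pyGet? name (0 : Int) with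
          | some c => if ¬ PySem.Chars.isalnum c then PySem.Chars.strip (replace_str_index name 0 []) else name
          | none => name
        let name :=
          if name ≠ [] then
            match PySem.List.pyGet? name (-1 : Int) with
            | some c =>
              if ¬ PySem.Chars.isalnum c then
                PySem.Chars.strip (replace_str_index name ((name.length : Int) - 1) [])
              else name
            | none => name
          else name
        let name_split := PySem.Chars.splitOn name " ".toList
        let name_split :=
          if name_split ≠ [] then
            if name_split.headI ∈ conjunctions then name_split.tail else name_split
          else name_split
        let name_split :=
          if name_split ≠ [] then
            match PySem.List.pyGet? name_split (-1 : Int) with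
            | some t => if t ∈ conjunctions then name_split.dropLast else name_split
            | none => name_split
          else name_split
        PySem.Chars.join " ".toList name_split
      else name
    if name = name1 then PySem.Chars.strip name else cleanedRecA n name

-- fuel 3*len+8: one pass removes every '&'/'-' (growing at most 3×), after which a changing pass shrinks the string
def cleaned_name (name1 : String) : String :=
  String.ofList (cleanedRecA (3 * name1.toList.length + 8) name1.toList)

-- ===== PORT B =====
-- one cleaning pass (Source B's `_pass`)
def stepB (prev : List Char) : List Char :=
  let s := PySem.Chars.replace
             (PySem.Chars.replace
               (PySem.Chars.replace (PySem.Chars.strip prev) "  ".toList " ".toList)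
               "&".toList "and".toList)
             "-".toList " ".toList
  if s = [] then s
  else
    let s := if ¬ PySem.Chars.isalnum s.headI then PySem.Chars.strip (PySem.List.slice s (some 1) none) else s
    let s := if s ≠ [] ∧ ¬ PySem.Chars.isalnum s.getLastI then
               PySem.Chars.strip (PySem.List.slice s none (some (-1)))
             else s
    let toks := PySem.Chars.splitOn s " ".toList
    let toks := if toks ≠ [] ∧ toks.headI ∈ conjunctions then PySem.List.slice toks (some 1) none else toks
    let toks := if toks ≠ [] ∧ toks.getLastI ∈ conjunctions then PySem.List.slice toks none (some (-1)) else toks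
    PySem.Chars.join " ".toList toks

-- Source B's `while True` loop, with the same ample fuel
def loopB : Nat → List Char → List Char
  | 0, name => name
  | n + 1, name =>
    let s := stepB name
    if s = name then PySem.Chars.strip s else loopB n s

def cleaned_name_alt (name1 : String) : String :=
  String.ofList (loopB (3 * name1.toList.length + 8) name1.toList)

-- ===== PRECONDITION & SPEC =====
def Spec_cleaned_name (name1 : String) (out : String) : Prop := out = cleaned_name_alt name1
instance (name1 : String) (out : String) : Decidable (Spec_cleaned_name name1 out) := by unfold Spec_cleaned_name; infer_instance

-- ===== CLAIM (what is proved, stated in full; the proofs are below) =====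
def Claim_equal_cleaned_name : Prop := ∀ (name1 : String), Dom_cleaned_name name1 → Spec_cleaned_name name1 (cleaned_name name1)

-- ===== LEMMAS AND PROOFS =====

theorem pyGet?_zero_of_ne_nil {α : Type} [Inhabited α] (xs : List α) (h : xs ≠ []) :
    PySem.List.pyGet? xs (0 : Int) = some xs.headI := by
  cases xs with
  | nil => exact absurd rfl h
  | cons a t => simp [PySem.List.pyGet?, PySem.List.pyIdx?]

theorem pyGet?_neg_one_of_ne_nil {α : Type} [Inhabited α] (xs : List α) (h : xs ≠ []) :
    PySem.List.pyGet? xs (-1 : Int) = some xs.getLastI := by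
  have hl : 0 < xs.length := List.length_pos_of_ne_nil h
  simp [PySem.List.pyGet?, PySem.List.pyIdx?, hl, List.getLastI_eq_getLast?_getD,
        List.getLast?_eq_getElem?]
  rw [if_pos (by omega)]
  simp [List.getElem?_eq_getElem (by omega : xs.length - 1 < xs.length)]

theorem replace_str_index_zero (s : List Char) :
    replace_str_index s 0 [] = PySem.List.slice s (some 1) none := by
  unfold replace_str_index
  rw [PySem.List.slice_to s (by omega), PySem.List.slice_from s (by omega), PySem.List.slice_from s (by omega)]
  simp

theorem replace_str_index_last (s : List Char) (h : s ≠ []) :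
    replace_str_index s ((s.length : Int) - 1) [] = s.dropLast := by
  have hl : 0 < s.length := List.length_pos_of_ne_nil h
  unfold replace_str_index
  rw [PySem.List.slice_to s (by omega), PySem.List.slice_from s (by omega)]
  have h1 : ((s.length : Int) - 1).toNat = s.length - 1 := by omega
  have h2 : ((s.length : Int) - 1 + 1).toNat = s.length := by omega
  simp [h1, List.dropLast_eq_take]

theorem stage1 (t : List Char) (h : t ≠ []) :
    (match PySem.List.pyGet? t (0 : Int) with
     | some c => if ¬ PySem.Chars.isalnum c then PySem.Chars.strip (replace_str_index t 0 []) else t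
     | none => t) =
    (if ¬ PySem.Chars.isalnum t.headI then PySem.Chars.strip (PySem.List.slice t (some 1) none) else t) := by
  rw [pyGet?_zero_of_ne_nil t h, replace_str_index_zero t]

theorem stage2 (u : List Char) :
    (if u ≠ [] then
       match PySem.List.pyGet? u (-1 : Int) with
       | some c =>
         if ¬ PySem.Chars.isalnum c then
           PySem.Chars.strip (replace_str_index u ((u.length : Int) - 1) [])
         else u
       | none => u
     else u) =
    (if u ≠ [] ∧ ¬ PySem.Chars.isalnum u.getLastI then
       PySem.Chars.strip (PySem.List.slice u none (some (-1)))
     else u) := by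
  by_cases hu : u = []
  · simp [hu]
  · rw [if_pos hu, pyGet?_neg_one_of_ne_nil u hu, replace_str_index_last u hu,
        PySem.List.slice_to_neg_one u]
    by_cases ha : PySem.Chars.isalnum u.getLastI
    · simp [ha]
    · simp [ha, hu]

theorem stage3 (ts : List (List Char)) :
    (if ts ≠ [] then if ts.headI ∈ conjunctions then ts.tail else ts else ts) =
    (if ts ≠ [] ∧ ts.headI ∈ conjunctions then PySem.List.slice ts (some 1) none else ts) := by
  rw [PySem.List.slice_from_one ts]
  by_cases h : ts = [] <;> by_cases hm : ts.headI ∈ conjunctions <;> simp [h, hm]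

theorem stage4 (ts : List (List Char)) :
    (if ts ≠ [] then
       match PySem.List.pyGet? ts (-1 : Int) with
       | some x => if x ∈ conjunctions then ts.dropLast else ts
       | none => ts
     else ts) =
    (if ts ≠ [] ∧ ts.getLastI ∈ conjunctions then PySem.List.slice ts none (some (-1)) else ts) := by
  rw [PySem.List.slice_to_neg_one ts]
  by_cases h : ts = []
  · simp [h]
  · rw [if_pos h, pyGet?_neg_one_of_ne_nil ts h]
    by_cases hm : ts.getLastI ∈ conjunctions <;> simp [h, hm]

theorem stepA_eq_stepB (s : List Char) :
    (let name := PySem.Chars.strip s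
     let name := PySem.Chars.replace name "  ".toList " ".toList
     let name := PySem.Chars.replace name "&".toList "and".toList
     let name := PySem.Chars.replace name "-".toList " ".toList
     if name ≠ [] then
        let name :=
          match PySem.List.pyGet? name (0 : Int) with
          | some c => if ¬ PySem.Chars.isalnum c then PySem.Chars.strip (replace_str_index name 0 []) else name
          | none => name
        let name :=
          if name ≠ [] then
            match PySem.List.pyGet? name (-1 : Int) with
            | some c =>
              if ¬ PySem.Chars.isalnum c then
                PySem.Chars.strip (replace_str_index name ((name.length : Int) - 1) [])
              else name
            | none => name
          else name
        let name_split := PySem.Chars.splitOn name " ".toList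
        let name_split :=
          if name_split ≠ [] then
            if name_split.headI ∈ conjunctions then name_split.tail else name_split
          else name_split
        let name_split :=
          if name_split ≠ [] then
            match PySem.List.pyGet? name_split (-1 : Int) with
            | some t => if t ∈ conjunctions then name_split.dropLast else name_split
            | none => name_split
          else name_split
        PySem.Chars.join " ".toList name_split
     else name) = stepB s := by
  unfold stepB
  dsimp only
  generalize PySem.Chars.replace
      (PySem.Chars.replace (PySem.Chars.replace (PySem.Chars.strip s) "  ".toList " ".toList)
        "&".toList "and".toList) "-".toList " ".toList = t
  by_cases h0 : t = []
  · rw [if_neg (by simp [h0] : ¬ t ≠ []), if_pos h0]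
  · rw [if_pos h0, if_neg h0, stage1 t h0, stage2, stage3, stage4]

theorem recA_eq_loopB (n : Nat) (s : List Char) : cleanedRecA n s = loopB n s := by
  induction n generalizing s with
  | zero => rfl
  | succ n ih =>
    show _ = loopB (n+1) s
    rw [cleanedRecA, loopB]
    simp only [stepA_eq_stepB s, ih]

-- ===== VERDICT (by name: the statement is the Claim_ definition above) =====
theorem cleaned_name_spec : Claim_equal_cleaned_name := by
  intro name1 _
  unfold Spec_cleaned_name cleaned_name cleaned_name_alt
  rw [recA_eq_loopB]
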